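-- pv_equiv track=rewrite | github.com/bChomonev/setup-tournament-schema | dynamic.py | generate_pairings_based_on_rankings
-- ===== SOURCE A (Python) =====
-- def generate_pairings_based_on_rankings(participants):
--     """
--     Generates pairings for the next round based on current rankings.
--     Assumes 'participants' is a list sorted by rankings, highest first.
--     """
--     pairings = []
--     # Generate pairings by taking two at a time from the sorted list
--     for i in range(0, len(participants), 2):
--         # Check if there's an odd participant out for a bye
--         if i + 1 < len(participants):
--             pair = (participants[i], participants[i+1], "")
--             pairings.append(pair)
--         else:
--             # Assign a bye (win) if odd number of participants
--             pair = (participants[i], 'Bye', 'Win')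
--             pairings.append(pair)
--     return pairings
-- ===== SOURCE B (Python) =====
-- def generate_pairings_based_on_rankings(participants):
--     """
--     Generates pairings for the next round based on current rankings.
--     Single pass with a 'pending' partner holder: no index arithmetic,
--     no in-loop bounds check; a leftover pending participant gets the bye.
--     """
--     pairings = []
--     pending = None
--     for p in participants:
--         if pending is None:
--             pending = p
--         else:
--             pairings.append((pending, p, ""))
--             pending = None
--     if pending is not None:
--         pairings.append((pending, 'Bye', 'Win'))
--     return pairings
-- ===== Notes on version B (the rewrite author's own statement) =====
-- stated objective: alternative
-- what changed: Replaced the step-2 index loop with an in-loop bounds check by a single pass over the elements holding a 'pending' partner, with the bye emitted after the loop from the leftover pending participant.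
import Mathlib
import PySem

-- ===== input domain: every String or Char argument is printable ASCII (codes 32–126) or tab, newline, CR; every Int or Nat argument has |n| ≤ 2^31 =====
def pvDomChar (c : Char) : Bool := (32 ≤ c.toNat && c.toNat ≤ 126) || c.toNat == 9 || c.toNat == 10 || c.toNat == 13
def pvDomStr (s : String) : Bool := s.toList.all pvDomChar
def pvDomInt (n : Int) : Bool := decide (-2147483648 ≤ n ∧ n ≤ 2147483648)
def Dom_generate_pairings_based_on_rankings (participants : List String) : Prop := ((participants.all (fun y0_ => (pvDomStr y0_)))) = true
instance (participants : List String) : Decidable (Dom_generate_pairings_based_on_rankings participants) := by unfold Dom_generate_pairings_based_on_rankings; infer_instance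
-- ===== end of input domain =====

-- B replaces A's step-2 index loop with an in-loop bounds check by a single pass
-- holding a 'pending' partner, the bye emitted after the loop; same output,
-- alternative decomposition.

-- ===== PORT A =====
def generate_pairings_based_on_rankings (participants : List String) : List (String × String × String) :=
  (PySem.List.pyRange 0 (participants.length : Int) 2).foldl
    (fun pairings i =>
      if i + 1 < (participants.length : Int) then
        pairings ++ [(PySem.List.pyGetD participants i "", PySem.List.pyGetD participants (i + 1) "", "")]
      else
        pairings ++ [(PySem.List.pyGetD participants i "", "Bye", "Win")])
    []

-- ===== PORT B =====
def generate_pairings_based_on_rankings_alt (participants : List String) : List (String × String × String) :=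
  let st := participants.foldl
    (fun (st : List (String × String × String) × Option String) p =>
      match st.2 with
      | none => (st.1, some p)
      | some pending => (st.1 ++ [(pending, p, "")], none))
    ([], none)
  match st.2 with
  | none => st.1
  | some pending => st.1 ++ [(pending, "Bye", "Win")]

-- ===== PRECONDITION & SPEC =====
def Spec_generate_pairings_based_on_rankings (participants : List String) (out : List (String × String × String)) : Prop := out = generate_pairings_based_on_rankings_alt participants
instance (participants : List String) (out : List (String × String × String)) : Decidable (Spec_generate_pairings_based_on_rankings participants out) := by unfold Spec_generate_pairings_based_on_rankings; infer_instance

-- ===== CLAIM (what is proved, stated in full; the proofs are below) =====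
def Claim_equal_generate_pairings_based_on_rankings : Prop := ∀ (participants : List String), Dom_generate_pairings_based_on_rankings participants → Spec_generate_pairings_based_on_rankings participants (generate_pairings_based_on_rankings participants)

-- ===== LEMMAS AND PROOFS =====

-- Proof-side helper: both ports equal this two-at-a-time recursion.
def pairRec : List String → List (String × String × String)
  | [] => []
  | [a] => [(a, "Bye", "Win")]
  | a :: b :: rest => (a, b, "") :: pairRec rest

-- A's result characterised on the Nat side: map over range ⌈len/2⌉, pairing 2k with 2k+1.
lemma rangeMap_eq_alt (l : List String) :
    (List.range ((l.length + 1) / 2)).map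
      (fun k => if 2 * k + 1 < l.length then (l.getD (2 * k) "", l.getD (2 * k + 1) "", "")
                else (l.getD (2 * k) "", "Bye", "Win"))
    = pairRec l := by
  induction l using pairRec.induct with
  | case1 => simp [pairRec]
  | case2 a => simp [pairRec]
  | case3 a b rest ih =>
      have hlen : ((a :: b :: rest).length + 1) / 2 = (rest.length + 1) / 2 + 1 := by
        simp only [List.length_cons]; omega
      rw [hlen, List.range_succ_eq_map, List.map_cons, List.map_map]
      have htail : List.map ((fun k => if 2 * k + 1 < (a :: b :: rest).length then
            ((a :: b :: rest).getD (2 * k) "", (a :: b :: rest).getD (2 * k + 1) "", "")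
          else ((a :: b :: rest).getD (2 * k) "", "Bye", "Win")) ∘ Nat.succ)
          (List.range ((rest.length + 1) / 2))
          = pairRec rest := by
        rw [← ih]
        apply List.map_congr_left
        intro k _
        have h2 : 2 * (k + 1) = 2 * k + 1 + 1 := by omega
        simp only [Function.comp, Nat.succ_eq_add_one, h2, List.length_cons]
        have hc : (2 * k + 1 + 1 + 1 < rest.length + 1 + 1) ↔ (2 * k + 1 < rest.length) := by omega
        simp [hc]
      rw [htail]
      simp [pairRec]

-- The step-2 pyRange of A is List.range ⌈len/2⌉ doubled.
lemma pyRange_two_len (n : Nat) :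
    PySem.List.pyRange 0 (n : Int) 2 = (List.range ((n + 1) / 2)).map (fun k => ((2 * k : Nat) : Int)) := by
  rw [PySem.List.pyRange_of_pos 0 (n : Int) (by norm_num)]
  have hM : (if (0 : Int) < (n : Int) then (((n : Int) - 0 + 2 - 1) / 2).toNat else 0) = (n + 1) / 2 := by
    split_ifs with h
    · omega
    · omega
  rw [hM]
  apply List.map_congr_left
  intro k _
  push_cast
  ring

theorem generate_pairings_based_on_rankings_eq_pairRec (l : List String) :
    generate_pairings_based_on_rankings l = pairRec l := by
  unfold generate_pairings_based_on_rankings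
  have hb : (PySem.List.pyRange 0 (l.length : Int) 2).foldl
      (fun pairings i =>
        if i + 1 < (l.length : Int) then
          pairings ++ [(PySem.List.pyGetD l i "", PySem.List.pyGetD l (i + 1) "", "")]
        else
          pairings ++ [(PySem.List.pyGetD l i "", "Bye", "Win")]) []
      = (PySem.List.pyRange 0 (l.length : Int) 2).foldl
      (fun pairings i =>
        pairings ++ [if i + 1 < (l.length : Int) then
            (PySem.List.pyGetD l i "", PySem.List.pyGetD l (i + 1) "", "")
          else (PySem.List.pyGetD l i "", "Bye", "Win")]) [] := by
    apply PySem.List.foldl_congr_mem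
    intro acc i _
    split <;> rfl
  rw [hb, PySem.List.foldl_append_singleton_eq_map, List.nil_append, pyRange_two_len,
      List.map_map, ← rangeMap_eq_alt]
  apply List.map_congr_left
  intro k _
  have g1 : PySem.List.pyGetD l (2 * (k : Int)) "" = l.getD (2 * k) "" := by
    rw [show (2 * (k : Int)) = ((2 * k : Nat) : Int) by push_cast; ring, PySem.List.pyGetD_natCast]
  have g2 : PySem.List.pyGetD l (2 * (k : Int) + 1) "" = l.getD (2 * k + 1) "" := by
    rw [show (2 * (k : Int) + 1) = ((2 * k + 1 : Nat) : Int) by push_cast; ring,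
        PySem.List.pyGetD_natCast]
  have hc : (2 * (k : Int) + 1 < (l.length : Int)) ↔ (2 * k + 1 < l.length) := by omega
  simp [Function.comp, g1, g2, hc, List.getD]


-- B's fold with a pending holder, generalized over the accumulated pairings.
lemma foldl_pending_eq_pairRec (l : List String) (pairs : List (String × String × String)) :
    (let st := l.foldl
        (fun (st : List (String × String × String) × Option String) p =>
          match st.2 with
          | none => (st.1, some p)
          | some pending => (st.1 ++ [(pending, p, "")], none))
        (pairs, none)
     match st.2 with
     | none => st.1
     | some pending => st.1 ++ [(pending, "Bye", "Win")])
    = pairs ++ pairRec l := by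
  induction l using pairRec.induct generalizing pairs with
  | case1 => simp [pairRec]
  | case2 a => simp [pairRec]
  | case3 a b rest ih =>
      simp only [List.foldl_cons]
      have := ih (pairs ++ [(a, b, "")])
      simp only [] at this ⊢
      rw [this]
      simp [pairRec]

lemma alt_eq_pairRec (l : List String) :
    generate_pairings_based_on_rankings_alt l = pairRec l := by
  have h := foldl_pending_eq_pairRec l []
  simp only [List.nil_append] at h
  exact h

-- ===== VERDICT (by name: the statement is the Claim_ definition above) =====
theorem generate_pairings_based_on_rankings_spec : Claim_equal_generate_pairings_based_on_rankings := by
  intro l _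
  unfold Spec_generate_pairings_based_on_rankings
  rw [generate_pairings_based_on_rankings_eq_pairRec, alt_eq_pairRec]
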